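-- pv_equiv track=rewrite | github.com/qirunzeng/NamedEntityRecognition | run_saved_models.py | build_tag_vocab
-- ===== SOURCE A (Python) =====
-- from typing import List, Tuple
--
-- def build_tag_vocab(tags: List[List[str]]):
--     tag2id = {}
--     for sent_tags in tags:
--         for t in sent_tags:
--             if t not in tag2id:
--                 tag2id[t] = len(tag2id)
--     id2tag = {i: t for t, i in tag2id.items()}
--     return tag2id, id2tag
-- ===== SOURCE B (Python) =====
-- from typing import List, Tuple
--
-- def build_tag_vocab(tags: List[List[str]]):
--     flat = [t for sent_tags in tags for t in sent_tags]
--     order = sorted(set(flat), key=flat.index)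
--     tag2id = {t: i for i, t in enumerate(order)}
--     id2tag = {i: t for i, t in enumerate(order)}
--     return tag2id, id2tag
-- ===== Notes on version B (the rewrite author's own statement) =====
-- stated objective: alternative
-- what changed: Instead of one pass with an incremental counter dict, B collects the distinct tags as a set and SORTS them by first-occurrence index (flat.index) to recover the id order, then builds both dicts by enumerate comprehensions.
import Mathlib
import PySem

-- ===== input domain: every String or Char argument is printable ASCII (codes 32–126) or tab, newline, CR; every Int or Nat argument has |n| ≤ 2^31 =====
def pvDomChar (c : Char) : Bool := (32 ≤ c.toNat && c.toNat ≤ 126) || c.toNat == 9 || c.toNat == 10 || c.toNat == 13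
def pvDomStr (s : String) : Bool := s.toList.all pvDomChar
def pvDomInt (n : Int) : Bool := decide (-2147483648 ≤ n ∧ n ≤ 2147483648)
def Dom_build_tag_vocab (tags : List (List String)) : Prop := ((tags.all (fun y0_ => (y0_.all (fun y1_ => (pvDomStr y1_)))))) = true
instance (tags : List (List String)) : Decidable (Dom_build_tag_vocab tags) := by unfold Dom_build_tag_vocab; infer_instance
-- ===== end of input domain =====

-- B recovers the id order by sorting the SET of tags by first-occurrence index instead of
-- A's single pass with an incremental counter dict (alternative algorithm; no speed claim).

-- ===== PORT A =====
def build_tag_vocab (tags : List (List String)) : (List (String × Int)) × (List (Int × String)) :=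
  let tag2id : PySem.Dict String Int :=
    tags.foldl (fun d sent_tags =>
      sent_tags.foldl (fun d t =>
        if d.contains t then d else d.insert t (d.size : Int)) d)
      PySem.Dict.empty
  -- {i: t for t, i in tag2id.items()} : a dict comprehension is an insert loop over the pairs
  let id2tag : PySem.Dict Int String :=
    tag2id.items.foldl (fun d p => d.insert p.2 p.1) PySem.Dict.empty
  (tag2id.items, id2tag.items)

-- ===== PORT B =====
def build_tag_vocab_alt (tags : List (List String)) : (List (String × Int)) × (List (Int × String)) :=
  let flat : List String := tags.flatten
  -- sorted(set(flat), key=flat.index): every element of the set is in flat, so flat.index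
  -- always returns (the .getD 0 default is never reached; exact on the set's elements)
  let order : List String :=
    PySem.List.sorted (PySem.Set.ofList flat) (fun t => (PySem.List.index? flat t).getD 0) false
  -- the two dict comprehensions run over DISTINCT keys (order is duplicate-free, the indices
  -- are distinct), so each dict's association list is exactly the enumerated pair list (exact)
  let tag2id : List (String × Int) := (PySem.List.enumerate order).map (fun p => (p.2, p.1))
  let id2tag : List (Int × String) := PySem.List.enumerate order
  (tag2id, id2tag)

-- ===== PRECONDITION & SPEC =====
def Spec_build_tag_vocab (tags : List (List String)) (out : (List (String × Int)) × (List (Int × String))) : Prop := out = build_tag_vocab_alt tags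
instance (tags : List (List String)) (out : (List (String × Int)) × (List (Int × String))) : Decidable (Spec_build_tag_vocab tags out) := by unfold Spec_build_tag_vocab; infer_instance

-- ===== CLAIM (what is proved, stated in full; the proofs are below) =====
def Claim_equal_build_tag_vocab : Prop := ∀ (tags : List (List String)), Dom_build_tag_vocab tags → Spec_build_tag_vocab tags (build_tag_vocab tags)

-- ===== LEMMAS AND PROOFS =====

-- the association list "first k elements of u, enumerated"
def itemsOf (u : List String) : List (String × Int) :=
  (PySem.List.enumerate u).map (fun p => (p.2, p.1))

theorem keys_mk_itemsOf (u : List String) :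
    (PySem.Dict.mk (itemsOf u)).keys = u := by
  simp [PySem.Dict.keys, itemsOf, List.map_map, Function.comp_def,
    PySem.List.map_snd_enumerate]

theorem itemsOf_append_singleton (u : List String) (x : String) :
    itemsOf (u ++ [x]) = itemsOf u ++ [(x, (u.length : Int))] := by
  simp [itemsOf, PySem.List.enumerate_append, PySem.List.enumerate]

-- A's inner loop body, starting from a dict holding the enumerated seen-set u,
-- tracks PySem.Set.add (ordered dedup) exactly
theorem loop_eq (xs : List String) (u : List String) (hu : u.Nodup) :
    xs.foldl (fun d t => if d.contains t then d else d.insert t (d.size : Int))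
        (PySem.Dict.mk (itemsOf u))
      = PySem.Dict.mk (itemsOf (xs.foldl PySem.Set.add u)) := by
  induction xs generalizing u with
  | nil => rfl
  | cons x xs ih =>
    have hk : (PySem.Dict.mk (itemsOf u)).keys = u := keys_mk_itemsOf u
    by_cases hx : x ∈ u
    · have hc : (PySem.Dict.mk (itemsOf u)).contains x = true := by
        rw [PySem.Dict.contains_eq_decide_mem_keys, hk]; simpa
      have hs : PySem.Set.add u x = u := by
        simp [PySem.Set.add, hx]
      simp only [List.foldl_cons, hc, if_true, hs]
      exact ih u hu
    · have hc : (PySem.Dict.mk (itemsOf u)).contains x = false := by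
        rw [PySem.Dict.contains_eq_decide_mem_keys, hk]; simpa
      have hs : PySem.Set.add u x = u ++ [x] := by
        simp [PySem.Set.add, hx]
      have hins : (PySem.Dict.mk (itemsOf u)).insert x
            (((PySem.Dict.mk (itemsOf u)).size : Int))
          = PySem.Dict.mk (itemsOf (u ++ [x])) := by
        apply PySem.Dict.ext
        rw [PySem.Dict.items_insert, hc]
        simp only [Bool.false_eq_true, if_false]
        have hsz : (PySem.Dict.mk (itemsOf u)).size = u.length := by
          simp [PySem.Dict.size, itemsOf, PySem.List.length_enumerate]
        simp [hsz, itemsOf_append_singleton]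
      simp only [List.foldl_cons, hc, Bool.false_eq_true, if_false, hs, hins]
      exact ih (u ++ [x]) (by simp [List.nodup_append, hu]; intro a ha he; exact hx (he ▸ ha))

theorem nodup_snd_itemsOf (u : List String) : ((itemsOf u).map (·.2)).Nodup := by
  have h := PySem.List.pairwise_lt_enumerate u 0
  have : ((itemsOf u).map (·.2)) = (PySem.List.enumerate u).map (·.1) := by
    simp [itemsOf, List.map_map, Function.comp_def]
  rw [this]
  exact (List.pairwise_map.mpr h).imp ne_of_lt

theorem id2tag_items (u : List String) :
    ((itemsOf u).foldl (fun d p => d.insert p.2 p.1)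
        (PySem.Dict.empty : PySem.Dict Int String)).items
      = PySem.List.enumerate u := by
  rw [PySem.Dict.items_foldl_insert_fresh (itemsOf u) (·.2) (·.1) _
        (fun a _ => PySem.Dict.contains_empty _) (nodup_snd_itemsOf u)]
  simp [itemsOf, List.map_map, Function.comp_def, PySem.Dict.empty]

-- first-occurrence index of a member is a valid index
theorem idx_lt_length (xs : List String) (a : String) (ha : a ∈ xs) :
    (PySem.List.index? xs a).getD 0 < xs.length := by
  obtain ⟨k, hk⟩ := Option.isSome_iff_exists.mp ((PySem.List.index?_isSome_iff xs a).mpr ha)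
  obtain ⟨hlt, -, -⟩ := PySem.List.getElem_of_index?_eq_some hk
  rw [hk]; simpa

-- ordered dedup is strictly increasing in first-occurrence index (reverse induction)
theorem dedup_pairwise_idx (xs : List String) :
    (PySem.List.dedup xs).Pairwise
      (fun a b => (PySem.List.index? xs a).getD 0 < (PySem.List.index? xs b).getD 0) := by
  induction xs using List.reverseRecOn with
  | nil => simp [PySem.List.dedup]
  | append_singleton xs y ih =>
    have hded : PySem.List.dedup (xs ++ [y]) = PySem.Set.add (PySem.List.dedup xs) y := by
      simp [PySem.List.dedup_eq_ofList, PySem.Set.ofList_eq_foldl, List.foldl_append]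
    by_cases hy : y ∈ xs
    · have : PySem.Set.add (PySem.List.dedup xs) y = PySem.List.dedup xs := by
        simp [PySem.Set.add, PySem.Set.contains, hy]
      rw [hded, this]
      refine ih.imp_of_mem ?_
      intro a b ha hb h
      rw [PySem.List.index?_append_of_mem [y] (((PySem.List.mem_dedup xs a).mp ha)),
          PySem.List.index?_append_of_mem [y] (((PySem.List.mem_dedup xs b).mp hb))]
      exact h
    · have : PySem.Set.add (PySem.List.dedup xs) y = PySem.List.dedup xs ++ [y] := by
        simp [PySem.Set.add, PySem.Set.contains, hy]
      rw [hded, this]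
      rw [List.pairwise_append]
      refine ⟨?_, by simp, ?_⟩
      · refine ih.imp_of_mem ?_
        intro a b ha hb h
        rw [PySem.List.index?_append_of_mem [y] (((PySem.List.mem_dedup xs a).mp ha)),
            PySem.List.index?_append_of_mem [y] (((PySem.List.mem_dedup xs b).mp hb))]
        exact h
      · intro a ha b hb
        rw [List.mem_singleton] at hb
        subst hb
        have hax : a ∈ xs := ((PySem.List.mem_dedup xs a).mp ha)
        rw [PySem.List.index?_append_of_mem [b] hax,
            PySem.List.index?_append_singleton_self xs b hy]
        simpa using idx_lt_length xs a hax

-- B's sort re-creates the ordered dedup: it is a strictly key-increasing rearrangement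
theorem sorted_set_eq_dedup (flat : List String) :
    PySem.List.sorted (PySem.Set.ofList flat)
        (fun t => (PySem.List.index? flat t).getD 0) false
      = PySem.List.dedup flat := by
  refine PySem.List.sorted_eq_of_perm_of_pairwise_lt _ _ _ ?_ (dedup_pairwise_idx flat)
  rw [PySem.List.dedup_eq_ofList]

-- ===== VERDICT (by name: the statement is the Claim_ definition above) =====
theorem build_tag_vocab_spec : Claim_equal_build_tag_vocab := by
  intro tags _
  unfold Spec_build_tag_vocab
  simp only [build_tag_vocab, build_tag_vocab_alt]
  rw [sorted_set_eq_dedup tags.flatten]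
  have hflat :
      tags.foldl (fun d sent_tags =>
          sent_tags.foldl (fun d t =>
            if d.contains t then d else d.insert t (d.size : Int)) d)
        PySem.Dict.empty
      = PySem.Dict.mk (itemsOf (PySem.List.dedup tags.flatten)) := by
    rw [← List.foldl_flatten]
    have he : (PySem.Dict.empty : PySem.Dict String Int) = PySem.Dict.mk (itemsOf []) := rfl
    rw [he, loop_eq tags.flatten [] List.nodup_nil]
    simp [PySem.List.dedup_eq_ofList, PySem.Set.ofList, PySem.Set.empty]
  rw [hflat]
  have hi : (PySem.Dict.mk (itemsOf (PySem.List.dedup tags.flatten))).items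
      = itemsOf (PySem.List.dedup tags.flatten) := rfl
  rw [hi, id2tag_items]
  rfl
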